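-- pv_equiv track=rewrite | github.com/wiiees/pyling23 | adventures/sentiment.py | basic_classifier
-- ===== SOURCE A (Python) =====
-- negative_words = ['awful', 'disgusting', 'shit', 'horrible', 'terrible']
--
-- positive_words = ['wonderful', 'amazing', 'beautiful', 'great', 'lovely']
--
-- def basic_classifier(text):
--
--     tokenized_text = text.split()
--
--     neg_count = sum([tokenized_text.count(neg_word) for neg_word in negative_words])
--     pos_count = sum([tokenized_text.count(pos_word) for pos_word in positive_words])
--
--     if neg_count > pos_count:
--         sentiment = 'neg'
--     else:
--         sentiment = 'pos'
--
--     return sentiment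
-- ===== SOURCE B (Python) =====
-- negative_words = ['awful', 'disgusting', 'shit', 'horrible', 'terrible']
--
-- positive_words = ['wonderful', 'amazing', 'beautiful', 'great', 'lovely']
--
-- _NEG = frozenset(negative_words)
-- _POS = frozenset(positive_words)
--
-- def basic_classifier(text):
--     neg = 0
--     pos = 0
--     for tok in text.split():
--         if tok in _NEG:
--             neg += 1
--         elif tok in _POS:
--             pos += 1
--     return 'neg' if neg > pos else 'pos'
-- ===== Notes on version B (the rewrite author's own statement) =====
-- stated objective: faster
-- what changed: Instead of one list.count pass over the tokens per sentiment word (10 scans), B makes a single pass over the tokens, classifying each token against two precomputed frozensets and keeping two counters.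
import Mathlib
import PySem

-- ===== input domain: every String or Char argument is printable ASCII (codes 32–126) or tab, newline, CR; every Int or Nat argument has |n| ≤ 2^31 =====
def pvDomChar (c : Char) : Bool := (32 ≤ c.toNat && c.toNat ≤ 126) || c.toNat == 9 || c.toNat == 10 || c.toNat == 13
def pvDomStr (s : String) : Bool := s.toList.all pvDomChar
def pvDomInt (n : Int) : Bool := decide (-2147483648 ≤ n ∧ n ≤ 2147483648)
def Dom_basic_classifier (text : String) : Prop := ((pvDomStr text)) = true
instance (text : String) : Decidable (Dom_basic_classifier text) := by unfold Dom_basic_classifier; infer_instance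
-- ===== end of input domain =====

-- B replaces A's ten list.count scans over the tokens with one pass over the tokens
-- and two set-membership counters (objective: faster by a constant factor).

-- ===== PORT A =====
def negative_words : List String := ["awful", "disgusting", "shit", "horrible", "terrible"]

def positive_words : List String := ["wonderful", "amazing", "beautiful", "great", "lovely"]

def basic_classifier (text : String) : String :=
  let tokenized_text := PySem.Str.split₀ text
  let neg_count : Int := (negative_words.map (fun neg_word => (tokenized_text.count neg_word : Int))).sum
  let pos_count : Int := (positive_words.map (fun pos_word => (tokenized_text.count pos_word : Int))).sum
  if neg_count > pos_count then "neg" else "pos"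

-- ===== PORT B =====
-- the frozensets of Source B, as PySem sets
def negSet : PySem.Set String := PySem.Set.ofList negative_words
def posSet : PySem.Set String := PySem.Set.ofList positive_words

def basic_classifier_alt (text : String) : String :=
  let counts := (PySem.Str.split₀ text).foldl
    (fun (acc : Int × Int) tok =>
      if tok ∈ negSet then (acc.1 + 1, acc.2)
      else if tok ∈ posSet then (acc.1, acc.2 + 1)
      else acc) (0, 0)
  if counts.1 > counts.2 then "neg" else "pos"

-- ===== PRECONDITION & SPEC =====
def Spec_basic_classifier (text : String) (out : String) : Prop := out = basic_classifier_alt text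
instance (text : String) (out : String) : Decidable (Spec_basic_classifier text out) := by unfold Spec_basic_classifier; infer_instance

-- ===== CLAIM (what is proved, stated in full; the proofs are below) =====
def Claim_equal_basic_classifier : Prop := ∀ (text : String), Dom_basic_classifier text → Spec_basic_classifier text (basic_classifier text)

-- ===== LEMMAS AND PROOFS =====

-- A-side sum of per-word counts, abstracted over the word list
def sumCount (W ts : List String) : Int := (W.map (fun w => (ts.count w : Int))).sum

lemma sum_indicator (W : List String) (h : W.Nodup) (t : String) :
    (W.map (fun w => if w = t then (1 : Int) else 0)).sum = (if t ∈ W then 1 else 0) := by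
  induction W with
  | nil => simp
  | cons w W' ih =>
    rcases List.nodup_cons.mp h with ⟨hw, hW'⟩
    by_cases he : w = t
    · subst he
      simp [List.mem_cons, hw, ih hW']
    · have h2 : ¬ t = w := fun hc => he hc.symm
      simp only [List.mem_cons, List.map_cons, List.sum_cons, if_neg he, ih hW', h2, zero_add, false_or]

lemma sumCount_cons (W : List String) (h : W.Nodup) (t : String) (ts : List String) :
    sumCount W (t :: ts) = sumCount W ts + (if t ∈ W then 1 else 0) := by
  unfold sumCount
  have : ∀ w : String, ((t :: ts).count w : Int) = (ts.count w : Int) + (if w = t then 1 else 0) := by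
    intro w
    by_cases he : w = t
    · simp [he]
    · have h2 : ¬ t = w := fun hc => he hc.symm
      simp [he, h2]
  calc (W.map (fun w => ((t :: ts).count w : Int))).sum
      = (W.map (fun w => (ts.count w : Int) + (if w = t then 1 else 0))).sum := by
        congr 1; exact List.map_congr_left (fun w _ => this w)
    _ = (W.map (fun w => (ts.count w : Int))).sum + (W.map (fun w => if w = t then (1 : Int) else 0)).sum := by
        simp [List.sum_map_add]
    _ = (W.map (fun w => (ts.count w : Int))).sum + (if t ∈ W then 1 else 0) := by
        rw [sum_indicator W h t]

lemma neg_nodup : negative_words.Nodup := by decide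
lemma pos_nodup : positive_words.Nodup := by decide

lemma mem_negSet_iff (t : String) : t ∈ negSet ↔ t ∈ negative_words := by
  simp [negSet, PySem.Set.mem_ofList]

lemma mem_posSet_iff (t : String) : t ∈ posSet ↔ t ∈ positive_words := by
  simp [posSet, PySem.Set.mem_ofList]

lemma disjoint_words (t : String) (hn : t ∈ negative_words) (hp : t ∈ positive_words) : False := by
  simp only [negative_words, positive_words, List.mem_cons, List.not_mem_nil, or_false] at hn hp
  rcases hn with rfl | rfl | rfl | rfl | rfl <;> revert hp <;> decide

lemma fold_counts (ts : List String) (n p : Int) :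
    ts.foldl
      (fun (acc : Int × Int) tok =>
        if tok ∈ negSet then (acc.1 + 1, acc.2)
        else if tok ∈ posSet then (acc.1, acc.2 + 1)
        else acc) (n, p)
    = (n + sumCount negative_words ts, p + sumCount positive_words ts) := by
  induction ts generalizing n p with
  | nil => simp [sumCount]
  | cons t ts ih =>
    rw [List.foldl_cons,
        sumCount_cons negative_words neg_nodup t ts,
        sumCount_cons positive_words pos_nodup t ts]
    by_cases hn : t ∈ negative_words
    · have hp : t ∉ positive_words := fun h => disjoint_words t hn h
      rw [if_pos ((mem_negSet_iff t).mpr hn)]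
      rw [ih]
      simp [hn, hp, Prod.ext_iff]
      omega
    · by_cases hp : t ∈ positive_words
      · rw [if_neg (fun h => hn ((mem_negSet_iff t).mp h)),
            if_pos ((mem_posSet_iff t).mpr hp), ih]
        simp [hn, hp, Prod.ext_iff]
        omega
      · rw [if_neg (fun h => hn ((mem_negSet_iff t).mp h)),
            if_neg (fun h => hp ((mem_posSet_iff t).mp h)), ih]
        simp [hn, hp]

-- ===== VERDICT (by name: the statement is the Claim_ definition above) =====
theorem basic_classifier_spec : Claim_equal_basic_classifier := by
  intro text _
  unfold Spec_basic_classifier basic_classifier basic_classifier_alt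
  rw [fold_counts (PySem.Str.split₀ text) 0 0]
  simp [sumCount]
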